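-- pv_equiv track=rewrite | github.com/kmcos/kmcos | tests/SQERTSS_unit_tests/throttling_test_reaction_local_smart/test_18.py | getSortedExpected_ptEF_list
-- ===== SOURCE A (Python) =====
-- def getSortedExpected_ptEF_list(expected_ptEFs_List):
--     sortedExpected_ptEF_list = []
--     for reactionNumberDesired in range(1,len(expected_ptEFs_List)+1): #loop once for each reaction to add
--         for listIndex in range(0,len(expected_ptEFs_List)): #loop again for each entry.
--             currentReactionNumber = expected_ptEFs_List[listIndex][0]
--             if currentReactionNumber == reactionNumberDesired:
--                 sortedExpected_ptEF_list.append(expected_ptEFs_List[listIndex])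
--     return sortedExpected_ptEF_list
-- ===== SOURCE B (Python) =====
-- def getSortedExpected_ptEF_list(expected_ptEFs_List):
--     buckets = {}
--     for row in expected_ptEFs_List:
--         buckets.setdefault(row[0], []).append(row)
--     out = []
--     for k in range(1, len(expected_ptEFs_List) + 1):
--         out.extend(buckets.get(k, []))
--     return out
-- ===== Notes on version B (the rewrite author's own statement) =====
-- stated objective: faster
-- what changed: Replaces A's nested scan (for each reaction number 1..n, rescan the whole list) by a single bucketing pass keyed on each row's first element followed by concatenating buckets 1..n; stable order per key is preserved.
import Mathlib
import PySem

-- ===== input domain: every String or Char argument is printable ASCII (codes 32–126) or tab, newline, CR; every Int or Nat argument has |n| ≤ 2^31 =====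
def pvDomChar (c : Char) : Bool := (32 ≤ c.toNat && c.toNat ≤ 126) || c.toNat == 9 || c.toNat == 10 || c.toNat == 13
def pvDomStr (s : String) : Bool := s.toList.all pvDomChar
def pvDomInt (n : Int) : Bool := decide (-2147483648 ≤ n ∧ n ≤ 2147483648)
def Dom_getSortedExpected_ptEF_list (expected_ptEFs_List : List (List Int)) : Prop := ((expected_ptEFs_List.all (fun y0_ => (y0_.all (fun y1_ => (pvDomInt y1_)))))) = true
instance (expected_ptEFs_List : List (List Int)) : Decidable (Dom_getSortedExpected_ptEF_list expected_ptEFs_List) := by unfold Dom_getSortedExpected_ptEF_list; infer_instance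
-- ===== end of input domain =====

-- B buckets rows by their first element in one pass and concatenates buckets 1..n (faster: O(n) vs A's O(n^2)).
-- ===== PORT A =====
def getSortedExpected_ptEF_list (expected_ptEFs_List : List (List Int)) : List (List Int) :=
  (PySem.List.pyRange 1 (PySem.List.len expected_ptEFs_List + 1) 1).foldl
    (fun sortedList reactionNumberDesired =>
      (PySem.List.pyRange 0 (PySem.List.len expected_ptEFs_List) 1).foldl
        (fun acc listIndex =>
          let row := PySem.List.pyGetD expected_ptEFs_List listIndex []
          let currentReactionNumber := PySem.List.pyGetD row 0 0  -- row[0]; Pre_ excludes empty rows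
          if currentReactionNumber = reactionNumberDesired then acc ++ [row] else acc)
        sortedList)
    []

-- ===== PORT B =====
def getSortedExpected_ptEF_list_alt (expected_ptEFs_List : List (List Int)) : List (List Int) :=
  let buckets : PySem.Dict Int (List (List Int)) :=
    expected_ptEFs_List.foldl
      (fun d row => d.modify (PySem.List.pyGetD row 0 0) [] (· ++ [row]))  -- setdefault(row[0],[]).append(row)
      PySem.Dict.empty
  (PySem.List.pyRange 1 (PySem.List.len expected_ptEFs_List + 1) 1).foldl
    (fun out k => out ++ buckets.getD k []) []

-- ===== PRECONDITION & SPEC =====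
-- Pre_ excludes inputs containing an empty inner list, on which both A ('row[0]') and B raise IndexError.
def Pre_getSortedExpected_ptEF_list (expected_ptEFs_List : List (List Int)) : Prop :=
  ∀ row ∈ expected_ptEFs_List, row ≠ []
instance (expected_ptEFs_List : List (List Int)) : Decidable (Pre_getSortedExpected_ptEF_list expected_ptEFs_List) := by unfold Pre_getSortedExpected_ptEF_list; infer_instance
def pvWitness_getSortedExpected_ptEF_list : List (List Int) := [[2, 7], [1, 5], [2, 9]]
def Spec_getSortedExpected_ptEF_list (expected_ptEFs_List : List (List Int)) (out : List (List Int)) : Prop := out = getSortedExpected_ptEF_list_alt expected_ptEFs_List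
instance (expected_ptEFs_List : List (List Int)) (out : List (List Int)) : Decidable (Spec_getSortedExpected_ptEF_list expected_ptEFs_List out) := by unfold Spec_getSortedExpected_ptEF_list; infer_instance

-- ===== CLAIM (what is proved, stated in full; the proofs are below) =====
def Claim_equal_getSortedExpected_ptEF_list : Prop := ∀ (expected_ptEFs_List : List (List Int)), Dom_getSortedExpected_ptEF_list expected_ptEFs_List → Pre_getSortedExpected_ptEF_list expected_ptEFs_List → Spec_getSortedExpected_ptEF_list expected_ptEFs_List (getSortedExpected_ptEF_list expected_ptEFs_List)

-- ===== LEMMAS AND PROOFS =====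

-- A equals: for each reaction number in 1..n, the rows whose first element is that number.
theorem portA_eq_flatMap (xs : List (List Int)) :
    getSortedExpected_ptEF_list xs =
      (PySem.List.pyRange 1 (PySem.List.len xs + 1) 1).flatMap
        (fun rd => xs.filter (fun row => PySem.List.pyGetD row 0 0 == rd)) := by
  unfold getSortedExpected_ptEF_list
  have hinner : ∀ (rd : Int) (acc : List (List Int)),
      (PySem.List.pyRange 0 (PySem.List.len xs) 1).foldl
        (fun acc listIndex =>
          let row := PySem.List.pyGetD xs listIndex []
          let c := PySem.List.pyGetD row 0 0
          if c = rd then acc ++ [row] else acc) acc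
      = acc ++ xs.filter (fun row => PySem.List.pyGetD row 0 0 == rd) := by
    intro rd acc
    rw [PySem.List.foldl_pyRange_zero_pyGetD xs []
      (fun acc row => if PySem.List.pyGetD row 0 0 = rd then acc ++ [row] else acc) acc]
    rw [PySem.List.foldl_append_ite_eq_filter]
    congr 1
  calc (PySem.List.pyRange 1 (PySem.List.len xs + 1) 1).foldl
        (fun s rd =>
          (PySem.List.pyRange 0 (PySem.List.len xs) 1).foldl
            (fun acc listIndex =>
              let row := PySem.List.pyGetD xs listIndex []
              let c := PySem.List.pyGetD row 0 0
              if c = rd then acc ++ [row] else acc) s) []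
      = (PySem.List.pyRange 1 (PySem.List.len xs + 1) 1).foldl
          (fun s rd => s ++ xs.filter (fun row => PySem.List.pyGetD row 0 0 == rd)) [] := by
        apply PySem.List.foldl_congr_mem
        intro s rd _
        exact hinner rd s
    _ = _ := by
        rw [PySem.List.foldl_append_eq_flatMap]
        simp

-- B's bucket for key k holds exactly the rows whose first element is k, in order.
theorem bucket_getD (xs : List (List Int)) (k : Int) :
    (xs.foldl (fun d row => d.modify (PySem.List.pyGetD row 0 0) [] (· ++ [row]))
        (PySem.Dict.empty : PySem.Dict Int (List (List Int)))).getD k []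
      = xs.filter (fun row => PySem.List.pyGetD row 0 0 == k) := by
  have : xs.foldl (fun d row => d.modify (PySem.List.pyGetD row 0 0) [] (· ++ [row]))
        (PySem.Dict.empty : PySem.Dict Int (List (List Int)))
      = (xs.map (fun row => (PySem.List.pyGetD row 0 0, row))).foldl
          (fun d p => d.modify p.1 [] (· ++ [p.2])) PySem.Dict.empty := by
    rw [List.foldl_map]
  rw [this, PySem.Dict.getD_foldl_modify_append]
  simp [List.filter_map, Function.comp_def]

-- ===== VERDICT (by name: the statement is the Claim_ definition above) =====
theorem getSortedExpected_ptEF_list_spec : Claim_equal_getSortedExpected_ptEF_list := by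
  intro xs _ _
  unfold Spec_getSortedExpected_ptEF_list
  rw [portA_eq_flatMap]
  unfold getSortedExpected_ptEF_list_alt
  rw [PySem.List.foldl_append_eq_flatMap]
  simp only [List.nil_append]
  apply List.flatMap_congr
  intro k _
  rw [bucket_getD]
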